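-- pv_equiv track=rewrite | github.com/chomusuke-mk/vidra | app/src/download/manager.py | _format_playlist_selection
-- ===== SOURCE A (Python) =====
-- from typing import Dict, Iterable, List, Mapping, Optional, Set, Tuple, Union, cast
--
-- def _format_playlist_selection(indices: Iterable[int]) -> Optional[str]:
--     normalized = sorted({index for index in indices if index > 0})
--     if not normalized:
--         return None
--     ranges: List[Tuple[int, int]] = []
--     start = normalized[0]
--     end = start
--     for index in normalized[1:]:
--         if index == end + 1:
--             end = index
--             continue
--         ranges.append((start, end))
--         start = end = index
--     ranges.append((start, end))
--     parts: List[str] = []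
--     for range_start, range_end in ranges:
--         if range_start == range_end:
--             parts.append(str(range_start))
--         else:
--             parts.append(f"{range_start}-{range_end}")
--     return ",".join(parts)
-- ===== SOURCE B (Python) =====
-- def _format_playlist_selection(indices):
--     present = {index for index in indices if index > 0}
--     starts = sorted(i for i in present if i - 1 not in present)
--     ends = sorted(i for i in present if i + 1 not in present)
--     if not starts:
--         return None
--     return ",".join(
--         str(a) if a == b else f"{a}-{b}" for a, b in zip(starts, ends)
--     )
-- ===== Notes on version B (the rewrite author's own statement) =====
-- stated objective: alternative
-- what changed: A sorts the whole set and scans it once carrying (start,end) run state; B never scans for runs at all: it detects run boundaries purely by set membership (i is a run start iff i-1 is absent, a run end iff i+1 is absent), sorts the two boundary lists and zips them into ranges.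
import Mathlib
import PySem

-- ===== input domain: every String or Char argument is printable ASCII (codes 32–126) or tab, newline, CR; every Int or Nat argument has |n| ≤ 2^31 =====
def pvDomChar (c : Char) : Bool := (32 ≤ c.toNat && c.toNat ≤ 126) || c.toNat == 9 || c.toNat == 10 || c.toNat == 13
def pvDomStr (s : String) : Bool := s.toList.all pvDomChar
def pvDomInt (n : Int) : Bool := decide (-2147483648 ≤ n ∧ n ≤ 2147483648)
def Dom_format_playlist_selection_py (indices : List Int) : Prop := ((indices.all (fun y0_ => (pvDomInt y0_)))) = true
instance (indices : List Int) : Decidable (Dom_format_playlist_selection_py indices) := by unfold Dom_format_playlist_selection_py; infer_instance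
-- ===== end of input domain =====

-- B replaces A's single forward scan that collapses the sorted set into (start,end) runs by a
-- membership-based boundary method: i starts a run iff i-1 is not in the set, i ends one iff i+1
-- is not; sorting the two boundary lists and zipping them yields the ranges (objective: alternative).

-- ===== PORT A =====
-- normalized = sorted({index for index in indices if index > 0})
def pvNormalized (indices : List Int) : List Int :=
  PySem.List.sorted (PySem.Set.ofList (indices.filter (fun i => decide (0 < i)))) (fun x => x) false

def format_playlist_selection_py (indices : List Int) : Option String :=
  match pvNormalized indices with
  | [] => none
  | start :: tail =>
    -- for index in normalized[1:]: carry (ranges, start, end)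
    let st := tail.foldl (fun (st : List (Int × Int) × Int × Int) index =>
        if index = st.2.2 + 1 then (st.1, st.2.1, index)
        else (st.1 ++ [(st.2.1, st.2.2)], index, index)) ([], start, start)
    let ranges := st.1 ++ [(st.2.1, st.2.2)]
    let parts := ranges.foldl (fun ps r =>
        ps ++ [if r.1 = r.2 then PySem.Int.toStr r.1
               else PySem.Int.toStr r.1 ++ "-" ++ PySem.Int.toStr r.2]) []
    some (PySem.Str.join "," parts)

-- ===== PORT B =====
def format_playlist_selection_py_alt (indices : List Int) : Option String :=
  -- present = {index for index in indices if index > 0}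
  let present : PySem.Set Int := PySem.Set.ofList (indices.filter (fun i => decide (0 < i)))
  -- starts = sorted(i for i in present if i - 1 not in present)  (sorted without key: Set order irrelevant)
  let starts := PySem.List.sorted (present.filter (fun i => decide ((i - 1) ∉ present))) (fun x => x) false
  -- ends = sorted(i for i in present if i + 1 not in present)
  let ends := PySem.List.sorted (present.filter (fun i => decide ((i + 1) ∉ present))) (fun x => x) false
  if starts = [] then none
  else
    some (PySem.Str.join "," ((starts.zip ends).map
      (fun p => if p.1 = p.2 then PySem.Int.toStr p.1
                else PySem.Int.toStr p.1 ++ "-" ++ PySem.Int.toStr p.2)))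

-- ===== PRECONDITION & SPEC =====
def Spec_format_playlist_selection_py (indices : List Int) (out : Option String) : Prop := out = format_playlist_selection_py_alt indices
instance (indices : List Int) (out : Option String) : Decidable (Spec_format_playlist_selection_py indices out) := by unfold Spec_format_playlist_selection_py; infer_instance

-- ===== CLAIM (what is proved, stated in full; the proofs are below) =====
def Claim_equal_format_playlist_selection_py : Prop := ∀ (indices : List Int), Dom_format_playlist_selection_py indices → Spec_format_playlist_selection_py indices (format_playlist_selection_py indices)

-- ===== LEMMAS AND PROOFS =====

/-- The runs of maximal consecutive stretches of a sorted list, as (start, end) pairs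
    (what A's scan computes). -/
def pvRuns (s e : Int) : List Int → List (Int × Int)
  | [] => [(s, e)]
  | x :: l => if x = e + 1 then pvRuns s x l else (s, e) :: pvRuns x x l

/-- Tail of the run starts after a pending run ending at `e`. -/
def pvS (e : Int) : List Int → List Int
  | [] => []
  | x :: l => if x = e + 1 then pvS x l else x :: pvS x l

/-- The run ends, with a pending run ending at `e`. -/
def pvE (e : Int) : List Int → List Int
  | [] => [e]
  | x :: l => if x = e + 1 then pvE x l else e :: pvE x l

def pvFmtPair (r : Int × Int) : String :=
  if r.1 = r.2 then PySem.Int.toStr r.1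
  else PySem.Int.toStr r.1 ++ "-" ++ PySem.Int.toStr r.2

theorem pvRuns_loopA : ∀ (l : List Int) (acc : List (Int × Int)) (s e : Int),
    (let st := l.foldl (fun (st : List (Int × Int) × Int × Int) index =>
        if index = st.2.2 + 1 then (st.1, st.2.1, index)
        else (st.1 ++ [(st.2.1, st.2.2)], index, index)) (acc, s, e)
     st.1 ++ [(st.2.1, st.2.2)]) = acc ++ pvRuns s e l := by
  intro l
  induction l with
  | nil => intro acc s e; simp [pvRuns]
  | cons x l ih =>
    intro acc s e
    simp only [List.foldl_cons, pvRuns]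
    by_cases h : x = e + 1
    · simp [h, ih]
    · simp [h, ih, List.append_assoc]

theorem pvRuns_fst : ∀ (l : List Int) (s e : Int),
    (pvRuns s e l).map Prod.fst = s :: pvS e l := by
  intro l
  induction l with
  | nil => intro s e; simp [pvRuns, pvS]
  | cons x t ih =>
    intro s e
    simp only [pvRuns, pvS]
    by_cases h : x = e + 1
    · simp [h, ih]
    · simp [h, ih]

theorem pvRuns_snd : ∀ (l : List Int) (s e : Int),
    (pvRuns s e l).map Prod.snd = pvE e l := by
  intro l
  induction l with
  | nil => intro s e; simp [pvRuns, pvE]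
  | cons x t ih =>
    intro s e
    simp only [pvRuns, pvE]
    by_cases h : x = e + 1
    · simp [h, ih]
    · simp [h, ih]

/-- On a strictly increasing list, an element is kept by the "i-1 absent" filter
    exactly when it starts a run. -/
theorem pvFilt_starts : ∀ (l : List Int) (y : Int), (y :: l).Pairwise (· < ·) →
    (y :: l).filter (fun z => decide ((z - 1) ∉ (y :: l))) = y :: pvS y l := by
  intro l
  induction l with
  | nil =>
    intro y _
    simp [pvS, List.filter]
  | cons x t ih =>
    intro y h
    have hyx : y < x := (List.pairwise_cons.mp h).1 x (by simp)
    have htail : (x :: t).Pairwise (· < ·) := (List.pairwise_cons.mp h).2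
    have hxt : ∀ z ∈ t, x < z := fun z hz => (List.pairwise_cons.mp htail).1 z hz
    have hyt : ∀ z ∈ t, y < z := fun z hz => (List.pairwise_cons.mp h).1 z (by simp [hz])
    have hheady : (y - 1) ∉ (y :: x :: t) := by
      intro hm
      rcases List.mem_cons.mp hm with h1 | hm
      · omega
      rcases List.mem_cons.mp hm with h1 | hm
      · omega
      · exact absurd (hyt _ hm) (by omega)
    have hx1 : ((x - 1) ∈ (y :: x :: t)) ↔ x = y + 1 := by
      constructor
      · intro hm
        rcases List.mem_cons.mp hm with h1 | hm
        · omega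
        rcases List.mem_cons.mp hm with h1 | hm
        · omega
        · exact absurd (hxt _ hm) (by omega)
      · intro hxy; exact List.mem_cons.mpr (Or.inl (by omega))
    have hqx : (x - 1) ∉ (x :: t) := by
      intro hm
      rcases List.mem_cons.mp hm with h1 | hm
      · omega
      · exact absurd (hxt _ hm) (by omega)
    have hcongr : ∀ z ∈ t,
        (decide ((z - 1) ∉ (y :: x :: t)) = decide ((z - 1) ∉ (x :: t))) := by
      intro z hz
      have hz1 : y < z := hyt z hz
      have hz2 : x < z := hxt z hz
      apply decide_eq_decide.mpr
      constructor
      · intro hn hm; exact hn (List.mem_cons.mpr (Or.inr hm))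
      · intro hn hm
        rcases List.mem_cons.mp hm with h1 | hm
        · omega
        · exact hn hm
    have hqt : t.filter (fun z => decide ((z - 1) ∉ (x :: t))) = pvS x t := by
      have hix := ih x htail
      rw [List.filter_cons_of_pos (by simpa using hqx)] at hix
      simpa using hix
    rw [List.filter_cons_of_pos (by simpa using hheady)]
    rw [List.filter_cons]
    rw [List.filter_congr hcongr, hqt]
    by_cases hxy : x = y + 1
    · have : (decide ((x - 1) ∉ (y :: x :: t))) = false := by
        simp only [decide_eq_false_iff_not, not_not]
        exact hx1.mpr hxy
      rw [this]
      simp [pvS, hxy]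
    · have : (decide ((x - 1) ∉ (y :: x :: t))) = true := by
        simp only [decide_eq_true_iff]
        intro hm; exact hxy (hx1.mp hm)
      rw [this]
      simp [pvS, hxy]

/-- On a strictly increasing list, an element is kept by the "i+1 absent" filter
    exactly when it ends a run. -/
theorem pvFilt_ends : ∀ (l : List Int) (y : Int), (y :: l).Pairwise (· < ·) →
    (y :: l).filter (fun z => decide ((z + 1) ∉ (y :: l))) = pvE y l := by
  intro l
  induction l with
  | nil =>
    intro y _
    simp [pvE, List.filter]
  | cons x t ih =>
    intro y h
    have hyx : y < x := (List.pairwise_cons.mp h).1 x (by simp)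
    have htail : (x :: t).Pairwise (· < ·) := (List.pairwise_cons.mp h).2
    have hxt : ∀ z ∈ t, x < z := fun z hz => (List.pairwise_cons.mp htail).1 z hz
    have hy1 : ((y + 1) ∈ (y :: x :: t)) ↔ x = y + 1 := by
      constructor
      · intro hm
        rcases List.mem_cons.mp hm with h1 | hm
        · omega
        rcases List.mem_cons.mp hm with h1 | hm
        · omega
        · exact absurd (hxt _ hm) (by omega)
      · intro hxy; exact List.mem_cons.mpr (Or.inr (List.mem_cons.mpr (Or.inl (by omega))))
    have hcongr : ∀ z ∈ (x :: t),
        (decide ((z + 1) ∉ (y :: x :: t)) = decide ((z + 1) ∉ (x :: t))) := by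
      intro z hz
      have hz1 : y < z := by
        rcases List.mem_cons.mp hz with h1 | hm
        · omega
        · exact lt_trans hyx (hxt _ hm)
      apply decide_eq_decide.mpr
      constructor
      · intro hn hm; exact hn (List.mem_cons.mpr (Or.inr hm))
      · intro hn hm
        rcases List.mem_cons.mp hm with h1 | hm
        · omega
        · exact hn hm
    rw [List.filter_cons]
    rw [List.filter_congr hcongr, ih x htail]
    by_cases hxy : x = y + 1
    · have : (decide ((y + 1) ∉ (y :: x :: t))) = false := by
        simp only [decide_eq_false_iff_not, not_not]
        exact hy1.mpr hxy
      rw [this]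
      simp [pvE, hxy]
    · have : (decide ((y + 1) ∉ (y :: x :: t))) = true := by
        simp only [decide_eq_true_iff]
        intro hm; exact hxy (hy1.mp hm)
      rw [this]
      simp [pvE, hxy]

theorem format_playlist_selection_py_eq (indices : List Int) :
    format_playlist_selection_py indices = format_playlist_selection_py_alt indices := by
  unfold format_playlist_selection_py format_playlist_selection_py_alt
  set s : PySem.Set Int := PySem.Set.ofList (indices.filter (fun i => decide (0 < i))) with hs
  have hnd : s.Nodup := PySem.Set.nodup_ofList _
  have hperm : (pvNormalized indices).Perm s := by
    unfold pvNormalized; rw [← hs]; exact PySem.List.sorted_perm _ _ _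
  have hnodn : (pvNormalized indices).Nodup := (hperm.nodup_iff).mpr hnd
  have hle : (pvNormalized indices).Pairwise (· ≤ ·) := by
    unfold pvNormalized; rw [← hs]
    exact PySem.List.sorted_pairwise _ _
  have hlt : (pvNormalized indices).Pairwise (· < ·) := by
    have := hle.and (List.nodup_iff_pairwise_ne.mp hnodn)
    exact this.imp (fun h => lt_of_le_of_ne h.1 h.2)
  -- the two boundary filters over s equal the same filters over the sorted list
  have hstarts : PySem.List.sorted (s.filter (fun i => decide ((i - 1) ∉ s))) (fun x => x) false
      = (pvNormalized indices).filter (fun i => decide ((i - 1) ∉ pvNormalized indices)) := by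
    have hpred : (fun i => decide ((i - 1) ∉ s)) = (fun i => decide ((i - 1) ∉ pvNormalized indices)) := by
      funext i; exact decide_eq_decide.mpr (by rw [hperm.mem_iff])
    apply PySem.List.sorted_eq_of_perm_of_pairwise_lt
    · rw [← hpred]; exact hperm.filter _
    · exact (List.Pairwise.filter _ hlt)
  have hends : PySem.List.sorted (s.filter (fun i => decide ((i + 1) ∉ s))) (fun x => x) false
      = (pvNormalized indices).filter (fun i => decide ((i + 1) ∉ pvNormalized indices)) := by
    have hpred : (fun i => decide ((i + 1) ∉ s)) = (fun i => decide ((i + 1) ∉ pvNormalized indices)) := by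
      funext i; exact decide_eq_decide.mpr (by rw [hperm.mem_iff])
    apply PySem.List.sorted_eq_of_perm_of_pairwise_lt
    · rw [← hpred]; exact hperm.filter _
    · exact (List.Pairwise.filter _ hlt)
  simp only [hstarts, hends]
  cases hn : pvNormalized indices with
  | nil => simp
  | cons y ys =>
    rw [hn] at hlt hstarts hends
    have hS := pvFilt_starts ys y hlt
    have hE := pvFilt_ends ys y hlt
    rw [hS, hE]
    have hfst := pvRuns_fst ys y y
    have hsnd := pvRuns_snd ys y y
    have hzip : (y :: pvS y ys).zip (pvE y ys) = pvRuns y y ys := by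
      rw [← hfst, ← hsnd, List.zip_map']
      simp
    rw [if_neg (by simp)]
    rw [hzip]
    simp only
    congr 1
    congr 1
    rw [pvRuns_loopA ys [] y y, List.nil_append]
    have hparts : ∀ (rs : List (Int × Int)),
        rs.foldl (fun ps r =>
          ps ++ [if r.1 = r.2 then PySem.Int.toStr r.1
                 else PySem.Int.toStr r.1 ++ "-" ++ PySem.Int.toStr r.2]) [] = rs.map pvFmtPair := by
      intro rs
      have := PySem.List.foldl_append_singleton_eq_map (f := pvFmtPair) (l := rs) (acc := [])
      simpa [pvFmtPair] using this
    rw [hparts]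
    exact List.map_congr_left (fun r _ => rfl)

-- ===== VERDICT (by name: the statement is the Claim_ definition above) =====
theorem format_playlist_selection_py_spec : Claim_equal_format_playlist_selection_py := by
  intro indices _
  unfold Spec_format_playlist_selection_py
  exact format_playlist_selection_py_eq indices
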